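-- pv_equiv track=rewrite | github.com/michebot/i-can-tell-that-you-been-practicing | contains_all_items.py | contains_all_items
-- ===== SOURCE A (Python) =====
-- def contains_all_items(list1, list2):
--
--     if type(list1) == int:
--         list1 = [list1]
--     if type(list2) == int:
--         list2 = [list2]
--     elif list1 == [] or list2 == []:
--         return True
--     elif list1 == list2:
--         return True
--
--     list1_dict = dict()
--     list2_dict = dict()
--
--     for item in list1:
--         list1_dict[item] = list1_dict.get(item, 0) + 1
--     for item in list2:
--         list2_dict[item] = list2_dict.get(item, 0) + 1
--
--     for item in list1_dict:
--         if item not in list2_dict: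
--             return False
--         elif item in list2_dict:
--             if list1_dict[item] > list2_dict[item]:
--                 return False
--     return True
-- ===== SOURCE B (Python) =====
-- def contains_all_items(list1, list2):
--     if type(list1) == int:
--         list1 = [list1]
--     if type(list2) == int:
--         list2 = [list2]
--     elif list1 == [] or list2 == []:
--         return True
--     elif list1 == list2:
--         return True
--
--     s1 = sorted(list1)
--     s2 = sorted(list2)
--     j = 0
--     for x in s1:
--         while j < len(s2) and s2[j] < x:
--             j += 1
--         if j >= len(s2) or s2[j] != x:
--             return False
--         j += 1
--     return True
-- ===== Notes on version B (the rewrite author's own statement) =====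
-- stated objective: alternative
-- what changed: Replaces A's hash-count strategy (two count dictionaries compared key by key) with sort-then-merge: both lists are sorted and a single two-pointer scan greedily matches each element of sorted list1 against sorted list2, which is correct because multiset containment is equivalent to sorted(list1) being a subsequence of sorted(list2).
import Mathlib
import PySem

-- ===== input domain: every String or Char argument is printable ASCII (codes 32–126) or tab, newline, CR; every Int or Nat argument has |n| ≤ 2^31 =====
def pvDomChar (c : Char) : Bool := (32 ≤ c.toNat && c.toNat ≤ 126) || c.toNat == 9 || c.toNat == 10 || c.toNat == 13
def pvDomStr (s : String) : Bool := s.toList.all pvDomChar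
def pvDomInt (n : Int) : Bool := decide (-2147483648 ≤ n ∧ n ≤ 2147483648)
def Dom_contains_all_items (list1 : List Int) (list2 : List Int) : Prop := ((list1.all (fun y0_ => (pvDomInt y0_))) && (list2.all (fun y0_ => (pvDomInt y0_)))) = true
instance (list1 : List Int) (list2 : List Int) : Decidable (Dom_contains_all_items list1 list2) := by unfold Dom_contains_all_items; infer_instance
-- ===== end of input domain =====

-- B replaces A's two count-dictionaries with sort-then-merge: sort both lists and check with one
-- two-pointer scan that sorted(list1) is a subsequence of sorted(list2) (objective: alternative, not faster).
-- In this Int-list setting Python's `type(listN) == int` guards are always False; they are therefore absent from both ports.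

-- ===== PORT A =====
-- the `for item in list1_dict:` loop of A, with early returns
def pvLoopA (d1 d2 : PySem.Dict Int Int) : List Int → Bool
  | [] => true
  | k :: ks =>
    if !(d2.contains k) then false
    else if d2.contains k then
      if d1.getD k 0 > d2.getD k 0 then false else pvLoopA d1 d2 ks
    else pvLoopA d1 d2 ks

def contains_all_items (list1 : List Int) (list2 : List Int) : Bool :=
  if list1 = [] ∨ list2 = [] then true
  else if list1 = list2 then true
  else
    let list1_dict := list1.foldl (fun d item => d.insert item (d.getD item 0 + 1)) PySem.Dict.empty
    let list2_dict := list2.foldl (fun d item => d.insert item (d.getD item 0 + 1)) PySem.Dict.empty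
    pvLoopA list1_dict list2_dict list1_dict.keys

-- ===== PORT B =====
-- B's `for x in s1:` loop with its inner `while` advancing the pointer into s2: structurally, the
-- while-step drops the head of s2 (y < x), a match consumes both heads, exhausting s2 returns False.
def pvMergeB : List Int → List Int → Bool
  | [], _ => true
  | _ :: _, [] => false
  | x :: xs, y :: ys =>
    if y < x then pvMergeB (x :: xs) ys
    else if y == x then pvMergeB xs ys
    else false

def contains_all_items_alt (list1 : List Int) (list2 : List Int) : Bool :=
  if list1 = [] ∨ list2 = [] then true
  else if list1 = list2 then true
  else
    let s1 := PySem.List.sorted list1 (fun x => x) false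
    let s2 := PySem.List.sorted list2 (fun x => x) false
    pvMergeB s1 s2

-- ===== PRECONDITION & SPEC =====
def Spec_contains_all_items (list1 : List Int) (list2 : List Int) (out : Bool) : Prop := out = contains_all_items_alt list1 list2
instance (list1 : List Int) (list2 : List Int) (out : Bool) : Decidable (Spec_contains_all_items list1 list2 out) := by unfold Spec_contains_all_items; infer_instance

-- ===== CLAIM =====
def Claim_equal_contains_all_items : Prop := ∀ (list1 : List Int) (list2 : List Int), Dom_contains_all_items list1 list2 → Spec_contains_all_items list1 list2 (contains_all_items list1 list2)

-- ===== LEMMAS AND PROOFS =====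

-- A's key-comparison loop succeeds iff every listed key is present in d2 with a large enough count
theorem pvLoopA_eq_true_iff (d1 d2 : PySem.Dict Int Int) (ks : List Int) :
    pvLoopA d1 d2 ks = true ↔ ∀ k ∈ ks, d2.contains k = true ∧ d1.getD k 0 ≤ d2.getD k 0 := by
  induction ks with
  | nil => simp [pvLoopA]
  | cons k ks ih =>
    cases h : d2.contains k with
    | false => simp [pvLoopA, h]
    | true =>
      by_cases hgt : d1.getD k 0 > d2.getD k 0
      · simp [pvLoopA, h, hgt]
      · simp [pvLoopA, h, hgt, ih]
        omega

-- A's whole count-compare phase ≡ multiset containment stated over counts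
theorem loopA_counters_iff (l1 l2 : List Int) :
    pvLoopA (PySem.Dict.counter l1) (PySem.Dict.counter l2) (PySem.Dict.counter l1).keys = true ↔
      ∀ k, l1.count k ≤ l2.count k := by
  rw [pvLoopA_eq_true_iff, PySem.Dict.keys_counter]
  constructor
  · intro hall k
    by_cases hk : k ∈ l1
    · have := (hall k (by rw [PySem.Set.mem_ofList]; exact hk)).2
      rw [PySem.Dict.getD_counter, PySem.Dict.getD_counter] at this
      exact_mod_cast this
    · have : l1.count k = 0 := List.count_eq_zero.mpr hk
      omega
  · intro hall k hk
    rw [PySem.Set.mem_ofList] at hk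
    have hle := hall k
    have hpos : 0 < l1.count k := List.count_pos_iff.mpr hk
    refine ⟨?_, ?_⟩
    · rw [PySem.Dict.contains_counter]
      have : 0 < l2.count k := by omega
      simp [List.count_pos_iff.mp this]
    · rw [PySem.Dict.getD_counter, PySem.Dict.getD_counter]
      exact_mod_cast hle

-- B's merge scan on two ≤-sorted lists succeeds iff the first is a subsequence of the second
theorem pvMergeB_eq_true_iff (s1 s2 : List Int)
    (h1 : s1.Pairwise (· ≤ ·)) (h2 : s2.Pairwise (· ≤ ·)) :
    pvMergeB s1 s2 = true ↔ s1.Sublist s2 := by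
  induction s2 generalizing s1 with
  | nil =>
    cases s1 with
    | nil => simp [pvMergeB]
    | cons x xs => simp [pvMergeB]
  | cons y ys ih =>
    cases s1 with
    | nil => simp [pvMergeB]
    | cons x xs =>
      rcases List.pairwise_cons.mp h2 with ⟨hy, hys⟩
      by_cases hlt : y < x
      · rw [show pvMergeB (x :: xs) (y :: ys) = pvMergeB (x :: xs) ys from by
            simp [pvMergeB, hlt]]
        rw [ih (x :: xs) h1 hys]
        constructor
        · exact fun h => h.cons y
        · intro h
          cases h with
          | cons _ h => exact h
          | cons₂ h => omega
      · by_cases heq : y = x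
        · subst heq
          rw [show pvMergeB (y :: xs) (y :: ys) = pvMergeB xs ys from by
              simp [pvMergeB]]
          rw [ih xs (List.pairwise_cons.mp h1).2 hys]
          exact (List.cons_sublist_cons).symm
        · have hgt : x < y := by omega
          rw [show pvMergeB (x :: xs) (y :: ys) = false from by
              simp [pvMergeB, hlt, heq]]
          simp only [Bool.false_eq_true, false_iff]
          intro h
          have hx : x ∈ y :: ys := h.subset (by simp)
          rcases List.mem_cons.mp hx with h' | h'
          · omega
          · have := hy x h'
            omega

-- B's whole sorted-merge phase ≡ the same multiset containment
theorem mergeB_sorted_iff (l1 l2 : List Int) :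
    pvMergeB (PySem.List.sorted l1 (fun x => x) false) (PySem.List.sorted l2 (fun x => x) false) = true ↔
      ∀ k, l1.count k ≤ l2.count k := by
  rw [pvMergeB_eq_true_iff _ _ (PySem.List.sorted_pairwise l1 (fun x => x))
        (PySem.List.sorted_pairwise l2 (fun x => x))]
  constructor
  · intro h k
    have := List.subperm_iff_count.mp h.subperm k
    rwa [(PySem.List.sorted_perm l1 (fun x => x) false).count_eq,
         (PySem.List.sorted_perm l2 (fun x => x) false).count_eq] at this
  · intro h
    refine List.sublist_of_subperm_of_pairwise (List.subperm_iff_count.mpr ?_)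
      (PySem.List.sorted_pairwise l1 (fun x => x)) (PySem.List.sorted_pairwise l2 (fun x => x))
    intro k
    rw [(PySem.List.sorted_perm l1 (fun x => x) false).count_eq,
        (PySem.List.sorted_perm l2 (fun x => x) false).count_eq]
    exact h k

-- ===== VERDICT =====
theorem contains_all_items_spec : Claim_equal_contains_all_items := by
  intro l1 l2 _
  unfold Spec_contains_all_items contains_all_items contains_all_items_alt
  by_cases h1 : l1 = [] ∨ l2 = []
  · simp [h1]
  · by_cases h2 : l1 = l2
    · simp [h2]
    · simp only [h1, h2, if_false]
      rw [PySem.Dict.foldl_insert_getD_add_one_eq_counter,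
          PySem.Dict.foldl_insert_getD_add_one_eq_counter]
      rw [Bool.eq_iff_iff, loopA_counters_iff, mergeB_sorted_iff]
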